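-- pv_equiv track=rewrite | github.com/MrBrantCode/unitest_baseline | mut_generate/mist_train_cf/cf_94743/solution.py | reverse_lookup_dict
-- ===== SOURCE A (Python) =====
-- def reverse_lookup_dict(words):
--     """
--     Create a dictionary where keys are the words (in lowercase) and values are lists of indices
--     where the word appears in the input list. The dictionary only includes words that contain
--     at least two vowels, and the function ignores case sensitivity.
--
--     Args:
--         words (list): A list of words.
--
--     Returns:
--         dict: A dictionary where keys are words and values are lists of indices.
--     """
--     reverse_dict = {}
--
--     for index, word in enumerate(words):
--         # Convert the word to lowercase for case insensitivity
--         lowercase_word = word.lower()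
--
--         # Count the number of vowels in the word
--         vowel_count = sum(1 for char in lowercase_word if char in 'aeiou')
--
--         # Check if the word contains at least two vowels
--         if vowel_count >= 2:
--             # Add the word and its index to the reverse lookup dictionary
--             if lowercase_word in reverse_dict:
--                 reverse_dict[lowercase_word].append(index)
--             else:
--                 reverse_dict[lowercase_word] = [index]
--
--     return reverse_dict
-- ===== SOURCE B (Python) =====
-- def reverse_lookup_dict(words):
--     # Two staged passes, no grouping dict: first collect the distinct qualifying
--     # lowercase keys in first-occurrence order, then gather each key's indices
--     # by a per-key scan of the lowered list.
--     lowered = [w.lower() for w in words]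
--     keys = []
--     for w in lowered:
--         if w not in keys and sum(c in 'aeiou' for c in w) >= 2:
--             keys.append(w)
--     return {k: [i for i, w in enumerate(lowered) if w == k] for k in keys}
-- ===== Notes on version B (the rewrite author's own statement) =====
-- stated objective: alternative
-- what changed: B builds no grouping dict at all: it first collects the distinct qualifying lowercase keys in first-occurrence order, then for each key rescans the lowered list to gather that key's indices (nested per-key scan instead of A's single pass appending into a dict).
import Mathlib
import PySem

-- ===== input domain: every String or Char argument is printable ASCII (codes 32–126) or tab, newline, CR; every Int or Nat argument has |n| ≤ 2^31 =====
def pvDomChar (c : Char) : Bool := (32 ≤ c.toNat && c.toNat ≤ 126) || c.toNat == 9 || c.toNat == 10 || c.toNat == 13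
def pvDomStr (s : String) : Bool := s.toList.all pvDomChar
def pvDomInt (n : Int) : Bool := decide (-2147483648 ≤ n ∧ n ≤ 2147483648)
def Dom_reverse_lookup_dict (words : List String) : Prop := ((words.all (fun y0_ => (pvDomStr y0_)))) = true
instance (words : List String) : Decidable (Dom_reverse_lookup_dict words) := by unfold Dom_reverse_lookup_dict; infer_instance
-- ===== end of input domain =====

-- B builds no grouping dict: it collects the distinct qualifying lowercase keys first,
-- then gathers each key's indices by a per-key scan (alternative decomposition; same order of results).


-- ===== PORT A =====
-- sum(1 for char in s if char in 'aeiou')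
def pvVowelSum (s : String) : Int :=
  (s.toList.map (fun c => if ("aeiou".toList).contains c then (1 : Int) else 0)).sum

def reverse_lookup_dict (words : List String) : List (String × List Int) :=
  ((PySem.List.enumerate words 0).foldl
    (fun (d : PySem.Dict String (List Int)) (p : Int × String) =>
      let lowercase_word := PySem.Str.lower p.2
      let vowel_count := pvVowelSum lowercase_word
      if vowel_count ≥ 2 then
        if d.contains lowercase_word then
          d.modify lowercase_word [] (fun v => v ++ [p.1])   -- reverse_dict[lw].append(index)
        else
          d.insert lowercase_word [p.1]
      else d)
    PySem.Dict.empty).items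

-- ===== PORT B =====
-- the 'keys' loop of Source B: distinct qualifying lowered words, first-occurrence order
def pvKeys (lowered : List String) : List String :=
  lowered.foldl
    (fun ks w => if !ks.contains w && decide (pvVowelSum w ≥ 2) then ks ++ [w] else ks) []

def reverse_lookup_dict_alt (words : List String) : List (String × List Int) :=
  let lowered := words.map PySem.Str.lower
  -- dict comprehension over the distinct keys: each value is the per-key index scan
  (pvKeys lowered).map (fun k =>
    (k, ((PySem.List.enumerate lowered 0).filter (fun p => p.2 == k)).map (·.1)))

-- ===== PRECONDITION & SPEC =====
def Spec_reverse_lookup_dict (words : List String) (out : List (String × List Int)) : Prop := out = reverse_lookup_dict_alt words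
instance (words : List String) (out : List (String × List Int)) : Decidable (Spec_reverse_lookup_dict words out) := by unfold Spec_reverse_lookup_dict; infer_instance

-- ===== CLAIM =====
def Claim_equal_reverse_lookup_dict : Prop := ∀ (words : List String), Dom_reverse_lookup_dict words → Spec_reverse_lookup_dict words (reverse_lookup_dict words)

-- ===== LEMMAS AND PROOFS =====

-- generalized accumulator form of pvKeys
theorem pv_keys_mem (ws : List String) (ks : List String) (k : String) :
    k ∈ ws.foldl
      (fun ks w => if !ks.contains w && decide (pvVowelSum w ≥ 2) then ks ++ [w] else ks) ks
    ↔ k ∈ ks ∨ (k ∈ ws ∧ pvVowelSum k ≥ 2) := by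
  induction ws generalizing ks with
  | nil => simp
  | cons w rest ih =>
      simp only [List.foldl_cons]
      by_cases hcond : (!ks.contains w && decide (pvVowelSum w ≥ 2)) = true
      · obtain ⟨hw, hv⟩ : w ∉ ks ∧ pvVowelSum w ≥ 2 := by simpa using hcond
        rw [if_pos hcond, ih]
        simp only [List.mem_append, List.mem_cons, List.not_mem_nil, or_false]
        constructor
        · rintro ((h | rfl) | h)
          exacts [Or.inl h, Or.inr ⟨Or.inl rfl, hv⟩, Or.inr ⟨Or.inr h.1, h.2⟩]
        · rintro (h | ⟨(rfl | hm), hkv⟩)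
          exacts [Or.inl (Or.inl h), Or.inl (Or.inr rfl), Or.inr ⟨hm, hkv⟩]
      · have h' : w ∈ ks ∨ ¬ pvVowelSum w ≥ 2 := by
          by_contra hb
          push_neg at hb
          exact hcond (by simp [hb.1, hb.2])
        rw [if_neg hcond, ih]
        simp only [List.mem_cons]
        constructor
        · rintro (h | h)
          exacts [Or.inl h, Or.inr ⟨Or.inr h.1, h.2⟩]
        · rintro (h | ⟨(rfl | hm), hkv⟩)
          · exact Or.inl h
          · rcases h' with h' | h'
            exacts [Or.inl h', absurd hkv h']
          · exact Or.inr ⟨hm, hkv⟩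

theorem pv_keys_nodup (ws : List String) (ks : List String) (h : ks.Nodup) :
    (ws.foldl
      (fun ks w => if !ks.contains w && decide (pvVowelSum w ≥ 2) then ks ++ [w] else ks) ks).Nodup := by
  induction ws generalizing ks with
  | nil => exact h
  | cons w rest ih =>
      simp only [List.foldl_cons]
      by_cases hcond : (!ks.contains w && decide (pvVowelSum w ≥ 2)) = true
      · obtain ⟨hw, _⟩ : w ∉ ks ∧ pvVowelSum w ≥ 2 := by simpa using hcond
        rw [if_pos hcond]
        refine ih _ ?_
        simp only [List.nodup_append, List.nodup_singleton, true_and, h]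
        intro a ha b hb hab
        rw [List.mem_singleton] at hb
        subst hb
        exact hw (hab ▸ ha)
      · rw [if_neg hcond]
        exact ih ks h

theorem pv_mem_pvKeys (ws : List String) (k : String) :
    k ∈ pvKeys ws ↔ k ∈ ws ∧ pvVowelSum k ≥ 2 := by
  unfold pvKeys; rw [pv_keys_mem]; simp

theorem pv_pvKeys_nodup (ws : List String) : (pvKeys ws).Nodup :=
  pv_keys_nodup ws [] (List.nodup_nil)

theorem pv_pvKeys_append (ws : List String) (w : String) :
    pvKeys (ws ++ [w])
      = if !(pvKeys ws).contains w && decide (pvVowelSum w ≥ 2) then pvKeys ws ++ [w]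
        else pvKeys ws := by
  unfold pvKeys; rw [List.foldl_append]; rfl

-- the main invariant: A's dict fold over any pair list has exactly B's items
theorem pv_main (l : List (Int × String)) :
    (l.foldl
      (fun (d : PySem.Dict String (List Int)) (p : Int × String) =>
        let lowercase_word := PySem.Str.lower p.2
        let vowel_count := pvVowelSum lowercase_word
        if vowel_count ≥ 2 then
          if d.contains lowercase_word then
            d.modify lowercase_word [] (fun v => v ++ [p.1])
          else
            d.insert lowercase_word [p.1]
        else d)
      PySem.Dict.empty).items
    = (pvKeys (l.map (fun p => PySem.Str.lower p.2))).map
        (fun k => (k, (l.filter (fun p => PySem.Str.lower p.2 == k)).map (·.1))) := by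
  induction l using List.reverseRecOn with
  | nil => rfl
  | append_singleton l' p ih =>
      rw [List.foldl_append, List.map_append, List.map_singleton, pv_pvKeys_append]
      set K := pvKeys (l'.map (fun p => PySem.Str.lower p.2)) with hK
      set d := l'.foldl
        (fun (d : PySem.Dict String (List Int)) (p : Int × String) =>
          let lowercase_word := PySem.Str.lower p.2
          let vowel_count := pvVowelSum lowercase_word
          if vowel_count ≥ 2 then
            if d.contains lowercase_word then
              d.modify lowercase_word [] (fun v => v ++ [p.1])
            else
              d.insert lowercase_word [p.1]
          else d)
        PySem.Dict.empty with hd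
      have hKnd : K.Nodup := pv_pvKeys_nodup _
      have hkeys : d.keys = K := by
        show d.items.map (·.1) = K
        rw [ih, List.map_map]
        exact List.map_id' K
      have hknd : d.keys.Nodup := hkeys ▸ hKnd
      have hmemK : ∀ k, k ∈ K ↔ k ∈ l'.map (fun p => PySem.Str.lower p.2) ∧ pvVowelSum k ≥ 2 :=
        fun k => pv_mem_pvKeys _ k
      simp only [List.foldl_cons, List.foldl_nil]
      by_cases hv : pvVowelSum (PySem.Str.lower p.2) ≥ 2
      · by_cases hin : PySem.Str.lower p.2 ∈ K
        · -- existing key: A appends inside, B's filter picks up p at this key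
          have hcd : d.contains (PySem.Str.lower p.2) = true :=
            (d.contains_iff_mem_keys _).mpr (hkeys ▸ hin)
          have hmemit : (PySem.Str.lower p.2,
              (l'.filter (fun q => PySem.Str.lower q.2 == PySem.Str.lower p.2)).map (·.1)) ∈ d.items := by
            rw [ih]; exact List.mem_map.mpr ⟨PySem.Str.lower p.2, hin, rfl⟩
          have hgd : d.getD (PySem.Str.lower p.2) []
              = (l'.filter (fun q => PySem.Str.lower q.2 == PySem.Str.lower p.2)).map (·.1) :=
            PySem.Dict.getD_of_mem_items d hmemit hknd []
          rw [if_pos hv, if_pos hcd, if_neg (by simp [hin]),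
              show d.modify (PySem.Str.lower p.2) [] (fun v => v ++ [p.1])
                = d.insert (PySem.Str.lower p.2) (d.getD (PySem.Str.lower p.2) [] ++ [p.1]) from rfl,
              PySem.Dict.items_insert_of_contains d _ hcd, ih, List.map_map]
          apply List.map_congr_left
          intro k hk
          by_cases he : k = PySem.Str.lower p.2
          · subst he
            simp [List.filter_append, hgd]
          · have hne' : PySem.Str.lower p.2 ≠ k := fun hx => he hx.symm
            simp [List.filter_append, he, hne']
        · -- new key: appended at the end on both sides
          have hcd : d.contains (PySem.Str.lower p.2) = false := by
            rw [Bool.eq_false_iff]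
            intro hb
            exact hin (hkeys ▸ (d.contains_iff_mem_keys _).mp hb)
          have hnotin : PySem.Str.lower p.2 ∉ l'.map (fun p => PySem.Str.lower p.2) := by
            intro hm; exact hin ((hmemK _).mpr ⟨hm, hv⟩)
          have hfilnil : l'.filter (fun q => PySem.Str.lower q.2 == PySem.Str.lower p.2) = [] := by
            rw [List.filter_eq_nil_iff]
            intro q hq hbe
            exact hnotin (List.mem_map.mpr ⟨q, hq, by simpa using hbe.symm⟩)
          rw [if_pos hv, if_neg (by simp [hcd]),
              if_pos (by simp [hin, hv]),
              PySem.Dict.items_insert_of_not_contains d _ hcd, ih, List.map_append]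
          congr 1
          · apply List.map_congr_left
            intro k hk
            have hne : (PySem.Str.lower p.2 == k) = false := by
              simp only [beq_eq_false_iff_ne, ne_eq]
              exact fun hx => hin (hx ▸ hk)
            simp [List.filter_append, hne]
          · simp [List.filter_append, hfilnil]
      · -- word with fewer than two vowels: ignored on both sides
        rw [if_neg hv, if_neg (by simp [hv]), ih]
        apply List.map_congr_left
        intro k hk
        have hkv : pvVowelSum k ≥ 2 := ((hmemK k).mp hk).2
        have hne : (PySem.Str.lower p.2 == k) = false := by
          simp only [beq_eq_false_iff_ne, ne_eq]
          exact fun he => hv (he ▸ hkv)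
        simp [List.filter_append, hne]

-- enumerate over a mapped list
theorem pv_enumerate_map {α β : Type} (f : α → β) (xs : List α) (s : Int) :
    PySem.List.enumerate (xs.map f) s
      = (PySem.List.enumerate xs s).map (fun p => (p.1, f p.2)) := by
  induction xs generalizing s with
  | nil => simp [PySem.List.enumerate_nil]
  | cons x rest ih => simp [PySem.List.enumerate_cons, ih]

-- ===== VERDICT =====
theorem reverse_lookup_dict_spec : Claim_equal_reverse_lookup_dict := by
  intro words _
  unfold Spec_reverse_lookup_dict reverse_lookup_dict reverse_lookup_dict_alt
  rw [pv_main]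
  have hsnd : (PySem.List.enumerate words 0).map (fun p => PySem.Str.lower p.2)
      = words.map PySem.Str.lower := by
    rw [show (fun p : Int × String => PySem.Str.lower p.2)
          = PySem.Str.lower ∘ (fun p : Int × String => p.2) from rfl,
        ← List.map_map, PySem.List.map_snd_enumerate]
  rw [hsnd]
  apply List.map_congr_left
  intro k hk
  rw [pv_enumerate_map, List.filter_map, List.map_map]
  rfl
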